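-- pv_equiv track=rewrite | github.com/bchwast/AGH-ASD | Ćwiczenia 7/covid_safety.py | covid_safety
-- ===== SOURCE A (Python) =====
-- def covid_safety(arr, k):
--     n = len(arr)
--     i = min(k, n - 1)
--     j = -1
--     cnt = 0
--     while i < n:
--         if i == j:
--             return -1
--         if arr[i] == 1:
--             cnt += 1
--             if i + k >= n:
--                 return cnt
--             j = i
--             i = min(2 * k + i, n)
--         i -= 1
--     return cnt
-- ===== SOURCE B (Python) =====
-- def covid_safety(arr, k):
--     n = len(arr)
--     if n == 0:
--         return -1
--     # prev[t] = nearest index <= t holding a 1, or -1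
--     prev = []
--     last = -1
--     for t, v in enumerate(arr):
--         if v == 1:
--             last = t
--         prev.append(last)
--     pos = min(k, n - 1)
--     j = -1
--     cnt = 0
--     while True:
--         p = prev[pos]
--         if p <= j:
--             return -1
--         cnt += 1
--         if p + k >= n:
--             return cnt
--         j = p
--         pos = min(2 * k + p, n) - 1
-- ===== Notes on version B (the rewrite author's own statement) =====
-- stated objective: alternative
-- what changed: B precomputes in one left-to-right pass a nearest-preceding-one table and replaces each of A's backward scans with a single table lookup per jump.
-- outside the precondition, e.g. on covid_safety([1], -1): A returns -1, B raises IndexError; on covid_safety([], 0): A returns -1, B returns -1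
import Mathlib
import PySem

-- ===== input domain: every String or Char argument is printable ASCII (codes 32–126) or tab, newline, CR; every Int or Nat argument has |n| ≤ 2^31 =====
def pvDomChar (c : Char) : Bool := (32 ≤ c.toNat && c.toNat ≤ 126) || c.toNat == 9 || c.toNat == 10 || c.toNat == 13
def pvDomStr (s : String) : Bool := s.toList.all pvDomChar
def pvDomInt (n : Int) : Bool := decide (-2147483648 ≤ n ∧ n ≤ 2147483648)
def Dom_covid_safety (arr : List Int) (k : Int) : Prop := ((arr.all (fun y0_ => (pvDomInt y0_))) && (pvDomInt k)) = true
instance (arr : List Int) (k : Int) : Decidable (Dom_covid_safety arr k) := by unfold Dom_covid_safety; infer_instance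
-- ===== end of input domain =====

-- B precomputes a nearest-preceding-one table and jumps via table lookups instead of
-- A's repeated backward scans (alternative algorithm; equality proved for k ≥ 1).

-- ===== PORT A =====
-- A's while loop, one fuel unit per iteration (fuel only makes the recursion total;
-- under Pre_ the chosen fuel is proved sufficient).  'none => 0' is Python's
-- IndexError, unreachable under Pre_.
def covidA_loop (arr : List Int) (k n : Int) : Nat → Int → Int → Int → Int
  | 0, _, _, _ => 0
  | f+1, i, j, cnt =>
    if i < n then
      if i = j then -1
      else
        match PySem.List.pyGet? arr i with
        | none => 0
        | some v =>
          if v = 1 then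
            if i + k ≥ n then cnt + 1
            else covidA_loop arr k n f (min (2*k + i) n - 1) i (cnt + 1)
          else covidA_loop arr k n f (i - 1) j cnt
    else cnt

def covid_safety (arr : List Int) (k : Int) : Int :=
  covidA_loop arr k arr.length (((arr.length : Int) + 1) * (2*k + 2) + arr.length + 1).toNat
    (min k ((arr.length : Int) - 1)) (-1) 0

-- ===== PORT B =====
-- prev[t] = nearest index ≤ t holding a 1, or -1 (Source B's enumerate/append loop).
def covidB_prev (arr : List Int) : List Int :=
  ((PySem.List.enumerate arr 0).foldl
    (fun (st : Int × List Int) p =>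
      let last := if p.2 = 1 then p.1 else st.1
      (last, st.2 ++ [last]))
    ((-1 : Int), ([] : List Int))).2

-- Source B's 'while True' loop; one fuel unit per iteration, 'none => 0' is IndexError.
def covidB_loop (prev : List Int) (k n : Int) : Nat → Int → Int → Int → Int
  | 0, _, _, _ => 0
  | f+1, pos, j, cnt =>
    match PySem.List.pyGet? prev pos with
    | none => 0
    | some p =>
      if p ≤ j then -1
      else if p + k ≥ n then cnt + 1
      else covidB_loop prev k n f (min (2*k + p) n - 1) p (cnt + 1)

def covid_safety_alt (arr : List Int) (k : Int) : Int :=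
  if (arr.length : Int) = 0 then -1
  else covidB_loop (covidB_prev arr) k arr.length (arr.length + 2)
    (min k ((arr.length : Int) - 1)) (-1) 0

-- ===== PRECONDITION & SPEC =====
-- Pre_ restricts to the natural domain k ≥ 1 (a spacing parameter).  For k ≤ 0 A's
-- negative-index wraparound scans from the array's end and usually raises IndexError or
-- returns an accidental -1; B itself raises there too (e.g. ([1], -1)).
def Pre_covid_safety (arr : List Int) (k : Int) : Prop := 1 ≤ k
instance (arr : List Int) (k : Int) : Decidable (Pre_covid_safety arr k) := by
  unfold Pre_covid_safety; infer_instance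
def pvWitness_covid_safety : List Int × Int := ([1], 1)

def Spec_covid_safety (arr : List Int) (k : Int) (out : Int) : Prop := out = covid_safety_alt arr k
instance (arr : List Int) (k : Int) (out : Int) : Decidable (Spec_covid_safety arr k out) := by
  unfold Spec_covid_safety; infer_instance

-- ===== CLAIM (what is proved, stated in full; the proofs are below) =====
def Claim_equal_covid_safety : Prop := ∀ (arr : List Int) (k : Int), Dom_covid_safety arr k → Pre_covid_safety arr k → Spec_covid_safety arr k (covid_safety arr k)

-- ===== LEMMAS AND PROOFS =====

-- nearest index ≤ m with arr[m] = 1 (or -1): the mathematical reading of covidB_prev.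
def prevAt (arr : List Int) : Nat → Int
  | 0 => if arr.getD 0 0 = 1 then 0 else -1
  | m+1 => if arr.getD (m+1) 0 = 1 then ((m : Int) + 1) else prevAt arr m

theorem prevAt_le (arr : List Int) (m : Nat) : prevAt arr m ≤ (m : Int) := by
  induction m with
  | zero => simp only [prevAt]; split <;> omega
  | succ m ih => simp only [prevAt]; split <;> push_cast <;> omega

theorem prevAt_append (xs : List Int) (a : Int) (m : Nat) (h : m < xs.length) :
    prevAt (xs ++ [a]) m = prevAt xs m := by
  induction m with
  | zero =>
    simp only [prevAt]
    rw [List.getD_append _ _ _ _ (by omega)]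
  | succ m ih =>
    simp only [prevAt]
    rw [List.getD_append _ _ _ _ h, ih (by omega)]

theorem prevAt_last_append (xs : List Int) (a : Int) :
    prevAt (xs ++ [a]) xs.length
      = if a = 1 then (xs.length : Int)
        else (if xs.length = 0 then -1 else prevAt xs (xs.length - 1)) := by
  have hget : (xs ++ [a]).getD xs.length 0 = a := by
    rw [List.getD_eq_getElem _ _ (by simp)]; simp
  cases hxs : xs.length with
  | zero =>
    have hxe : xs = [] := List.length_eq_zero_iff.mp hxs
    subst hxe
    simp [prevAt, List.getD]
  | succ m =>
    simp only [prevAt]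
    rw [hxs] at hget
    rw [hget, if_neg (by omega : ¬ (m + 1 = 0)), Nat.add_sub_cancel]
    split
    · push_cast; ring
    · exact prevAt_append xs a m (by omega)

-- the fold in covidB_prev computes (last one's index, the prev table)
theorem covidB_fold_eq (arr : List Int) :
    (PySem.List.enumerate arr 0).foldl
      (fun (st : Int × List Int) p =>
        let last := if p.2 = 1 then p.1 else st.1
        (last, st.2 ++ [last]))
      ((-1 : Int), ([] : List Int))
    = ((if arr.length = 0 then -1 else prevAt arr (arr.length - 1)),
       (List.range arr.length).map (prevAt arr)) := by
  induction arr using List.reverseRecOn with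
  | nil => simp [PySem.List.enumerate]
  | append_singleton xs a ih =>
    rw [PySem.List.enumerate_append, List.foldl_append, ih]
    simp only [PySem.List.enumerate_cons, PySem.List.enumerate_nil, List.foldl_cons,
      List.foldl_nil, List.length_append, List.length_singleton]
    have hmap : (List.range xs.length).map (prevAt (xs ++ [a]))
        = (List.range xs.length).map (prevAt xs) := by
      apply List.map_congr_left
      intro m hm
      exact prevAt_append xs a m (List.mem_range.mp hm)
    have hfst : (if a = 1 then ((0 : Int) + xs.length)
          else (if xs.length = 0 then -1 else prevAt xs (xs.length - 1)))
        = prevAt (xs ++ [a]) xs.length := by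
      rw [prevAt_last_append]
      split
      · ring
      · rfl
    simp only [Prod.mk.injEq]
    refine ⟨?_, ?_⟩
    · rw [hfst, if_neg (Nat.succ_ne_zero xs.length), Nat.add_sub_cancel]
    · rw [List.range_succ, List.map_append, hmap, List.map_cons, List.map_nil, hfst]

theorem covidB_prev_eq (arr : List Int) :
    covidB_prev arr = (List.range arr.length).map (prevAt arr) := by
  unfold covidB_prev
  rw [covidB_fold_eq]

theorem covidB_prev_get (arr : List Int) (pos : Int) (h0 : 0 ≤ pos)
    (h1 : pos < (arr.length : Int)) :
    PySem.List.pyGet? (covidB_prev arr) pos = some (prevAt arr pos.toNat) := by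
  rw [PySem.List.pyGet?_of_nonneg _ h0, covidB_prev_eq]
  rw [List.getElem?_map]
  rw [List.getElem?_range (by omega)]
  rfl

-- main correspondence: A's backward scan from i (with B parked at pos, same prev value)
-- equals B's table-lookup loop.
theorem loopAB (arr : List Int) (k : Int) (hk : 1 ≤ k) :
    ∀ (fA : Nat) (i j cnt pos : Int) (fB : Nat),
      -1 ≤ j → j ≤ i → i ≤ pos → 0 ≤ pos → pos < (arr.length : Int) →
      prevAt arr pos.toNat = (if i < 0 then -1 else prevAt arr i.toNat) →
      (((arr.length : Int) - j) * (2*k + 2) + (i - j)).toNat ≤ fA →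
      ((arr.length : Int) - j).toNat ≤ fB →
      covidA_loop arr k arr.length fA i j cnt
        = covidB_loop (covidB_prev arr) k arr.length fB pos j cnt := by
  intro fA
  induction fA with
  | zero =>
    intro i j cnt pos fB hj hji hip h0p hpn hprev hfA hfB
    exfalso
    have hP : (1:Int) * (2*k + 2) ≤ ((arr.length : Int) - j) * (2*k + 2) :=
      mul_le_mul_of_nonneg_right (by omega) (by omega)
    omega
  | succ f ih =>
    intro i j cnt pos fB hj hji hip h0p hpn hprev hfA hfB
    have hn1 : (1:Int) ≤ (arr.length : Int) - j := by omega
    obtain ⟨f', rfl⟩ : ∃ f', fB = f' + 1 := by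
      cases fB with
      | zero => exfalso; omega
      | succ f' => exact ⟨f', rfl⟩
    have hBget := covidB_prev_get arr pos h0p hpn
    by_cases hij : i = j
    · -- A returns -1; B's prev value is ≤ j
      subst hij
      have hA : covidA_loop arr k arr.length (f+1) i i cnt = -1 := by
        simp [covidA_loop, show i < (arr.length:Int) by omega]
      have hple : prevAt arr pos.toNat ≤ i := by
        rw [hprev]
        split
        · omega
        · calc prevAt arr i.toNat ≤ (i.toNat : Int) := prevAt_le arr i.toNat
            _ = i := by omega
      rw [hA]
      simp [covidB_loop, hBget, hple]
    · -- i > j, so 0 ≤ i : a real array access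
      have h0i : 0 ≤ i := by omega
      have hin : i < (arr.length : Int) := by omega
      have hAget : PySem.List.pyGet? arr i = some arr[i.toNat] :=
        PySem.List.pyGet?_eq_some_getElem arr h0i hin
      have hgetD : arr.getD i.toNat 0 = arr[i.toNat] :=
        List.getD_eq_getElem arr 0 (by omega)
      by_cases hv : arr[i.toNat] = (1:Int)
      · -- found a 1 at i: prevAt i = i
        have hpi : prevAt arr i.toNat = i := by
          have hvD : arr.getD i.toNat 0 = 1 := by rw [hgetD]; exact hv
          cases hiN : i.toNat with
          | zero =>
            have hvD' : arr.getD 0 0 = 1 := by rw [← hiN]; exact hvD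
            simp only [prevAt]
            rw [if_pos hvD']
            omega
          | succ m =>
            have hvD' : arr.getD (m + 1) 0 = 1 := by rw [← hiN]; exact hvD
            simp only [prevAt]
            rw [if_pos hvD']
            omega
        have hp : prevAt arr pos.toNat = i := by rw [hprev, if_neg (by omega), hpi]
        by_cases hend : i + k ≥ (arr.length : Int)
        · -- both return cnt + 1
          have hA : covidA_loop arr k arr.length (f+1) i j cnt = cnt + 1 := by
            simp [covidA_loop, show i < (arr.length:Int) by omega, hij, hAget, hv, hend]
          rw [hA]
          simp [covidB_loop, hBget, hp, show ¬ i ≤ j by omega, hend]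
        · -- both jump to i' = min (2k+i) n - 1 with j := i
          have hA : covidA_loop arr k arr.length (f+1) i j cnt
              = covidA_loop arr k arr.length f (min (2*k + i) (arr.length:Int) - 1) i (cnt+1) := by
            simp [covidA_loop, show i < (arr.length:Int) by omega, hij, hAget, hv, hend]
          have hB : covidB_loop (covidB_prev arr) k arr.length (f'+1) pos j cnt
              = covidB_loop (covidB_prev arr) k arr.length f' (min (2*k + i) (arr.length:Int) - 1) i (cnt+1) := by
            simp [covidB_loop, hBget, hp, show ¬ i ≤ j by omega, hend]
          rw [hA, hB]
          set i' := min (2*k + i) (arr.length:Int) - 1 with hi'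
          have hnik : i + k < (arr.length : Int) := by omega
          have hlow : i + 1 ≤ i' := by
            have h1 : i + 2 ≤ 2*k + i := by omega
            have h2 : i + 2 ≤ (arr.length : Int) := by omega
            omega
          have hih : i' < (arr.length : Int) := by omega
          apply ih i' i (cnt+1) i' f' (by omega) (by omega) (le_refl _) (by omega) hih
            (by rw [if_neg (by omega)])
          · -- fuel A bound
            have hQ : ((arr.length:Int) - i + 1) * (2*k + 2) ≤ ((arr.length:Int) - j) * (2*k + 2) :=
              mul_le_mul_of_nonneg_right (by omega) (by omega)
            rw [add_mul] at hQ
            have hi'2 : i' ≤ 2*k + i - 1 := by omega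
            omega
          · omega
      · -- arr[i] ≠ 1: A decrements; B's prev value is unchanged
        have hA : covidA_loop arr k arr.length (f+1) i j cnt
            = covidA_loop arr k arr.length f (i-1) j cnt := by
          simp [covidA_loop, show i < (arr.length:Int) by omega, hij, hAget, hv]
        rw [hA]
        apply ih (i-1) j cnt pos (f'+1) hj (by omega) (by omega) h0p hpn _ (by omega) hfB
        · -- prev value stability
          rw [hprev, if_neg (by omega)]
          have hvD : arr.getD i.toNat 0 ≠ 1 := by rw [hgetD]; exact hv
          cases hiN : i.toNat with
          | zero =>
            have hvD' : arr.getD 0 0 ≠ 1 := by rw [← hiN]; exact hvD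
            rw [if_pos (by omega : i - 1 < 0)]
            simp only [prevAt]
            rw [if_neg hvD']
          | succ m =>
            have hvD' : arr.getD (m + 1) 0 ≠ 1 := by rw [← hiN]; exact hvD
            rw [if_neg (by omega : ¬ (i - 1 < 0)), show (i - 1).toNat = m by omega]
            simp only [prevAt]
            rw [if_neg hvD']

-- ===== VERDICT (by name: the statement is the Claim_ definition above) =====
theorem covid_safety_spec : Claim_equal_covid_safety := by
  intro arr k _ hk
  unfold Spec_covid_safety covid_safety covid_safety_alt
  have hk1 : (1:Int) ≤ k := hk
  by_cases hn : (arr.length : Int) = 0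
  · -- empty array: A's first iteration hits i = j = -1, B returns -1 directly
    rw [if_pos hn]
    have hmin : min k ((arr.length : Int) - 1) = -1 := by
      rw [hn]; simp; omega
    have hF : ∃ m, (((arr.length : Int) + 1) * (2*k + 2) + arr.length + 1).toNat = m + 1 := by
      have h2 : ((0:Int) + 1) * (2*k + 2) + 0 + 1 = 2*k + 3 := by ring
      rw [hn, h2]
      exact ⟨(2*k + 2).toNat, by omega⟩
    obtain ⟨m, hm⟩ := hF
    rw [hmin, hm]
    simp [covidA_loop, hn]
  · rw [if_neg hn]
    have hn1 : (1:Int) ≤ (arr.length : Int) := by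
      have : (0:Int) ≤ (arr.length : Int) := by positivity
      omega
    set i0 := min k ((arr.length : Int) - 1) with hi0
    have h0 : 0 ≤ i0 := by
      have := le_min hk1 (show (1:Int) ≤ (arr.length:Int) - 1 + 1 by omega)
      omega
    have h1 : i0 < (arr.length : Int) := by omega
    apply loopAB arr k hk1 _ i0 (-1) 0 i0 _ (by omega) (by omega) (le_refl _) h0 h1
      (by rw [if_neg (by omega)])
    · have : ((arr.length:Int) - (-1)) = (arr.length:Int) + 1 := by ring
      rw [this]
      omega
    · omega
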